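-- pv_equiv track=rewrite | github.com/luisoala/croissant | tasks/benchmark_examples/absencebench/runs/02b87497_2026-04-29T14-58Z/ct2code/absencebench_implementation.py | per_instance_metrics
-- ===== SOURCE A (Python) =====
-- def normalize(s: str) -> str:
--   return s.strip()
--
-- def per_instance_metrics(gold: list[str], pred: list[str]) -> dict[str, float | int]:
--   gold_norm = [normalize(g) for g in gold if normalize(g)]
--   pred_norm = [normalize(p) for p in pred if normalize(p)]
--
--   gold_pool = list(gold_norm)
--   tp = 0
--   for p in pred_norm:
--     if p in gold_pool:
--       tp += 1
--       gold_pool.remove(p)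
--   fp = len(pred_norm) - tp
--   fn = len(gold_norm) - tp
--
--   exact_match = int(sorted(gold_norm) == sorted(pred_norm))
--   return {"tp": tp, "fp": fp, "fn": fn, "exact_match": exact_match}
-- ===== SOURCE B (Python) =====
-- def _counter(xs):
--     c = {}
--     for x in xs:
--         c[x] = c.get(x, 0) + 1
--     return c
--
-- def per_instance_metrics(gold, pred):
--     gold_norm = [s for s in (g.strip() for g in gold) if s]
--     pred_norm = [s for s in (p.strip() for p in pred) if s]
--     gcnt = _counter(gold_norm)
--     pcnt = _counter(pred_norm)
--     tp = 0
--     for k, n in pcnt.items():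
--         tp += min(n, gcnt.get(k, 0))
--     exact_match = int(len(gold_norm) == len(pred_norm) == tp)
--     return {"tp": tp, "fp": len(pred_norm) - tp, "fn": len(gold_norm) - tp,
--             "exact_match": exact_match}
-- ===== Notes on version B (the rewrite author's own statement) =====
-- stated objective: faster
-- what changed: Replaces the greedy pool-membership/remove loop by two count tables (counters) with tp computed as the sum of per-key minima (multiset intersection), and replaces the sorted-lists comparison for exact_match by the arithmetic test len(gold_norm) == len(pred_norm) == tp.
import Mathlib
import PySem

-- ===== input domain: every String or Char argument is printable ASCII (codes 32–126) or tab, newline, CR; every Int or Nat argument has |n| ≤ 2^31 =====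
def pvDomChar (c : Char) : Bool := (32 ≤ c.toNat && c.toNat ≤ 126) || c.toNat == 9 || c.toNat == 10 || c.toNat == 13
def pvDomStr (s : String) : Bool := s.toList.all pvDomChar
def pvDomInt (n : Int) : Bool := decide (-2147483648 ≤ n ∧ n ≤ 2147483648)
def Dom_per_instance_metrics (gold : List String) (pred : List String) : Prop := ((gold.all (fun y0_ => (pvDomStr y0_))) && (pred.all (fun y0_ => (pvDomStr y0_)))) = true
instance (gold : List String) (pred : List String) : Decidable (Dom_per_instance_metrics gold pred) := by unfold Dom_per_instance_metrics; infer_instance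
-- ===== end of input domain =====

-- B replaces A's greedy pool-scanning match loop by two count tables and a single
-- pass over the prediction counter (tp = multiset-intersection size), and replaces
-- the sorted-list comparison by the arithmetic test |gold| = |pred| = tp.

-- ===== PORT A =====
def per_instance_metrics (gold : List String) (pred : List String) : List (String × Int) :=
  let gold_norm := (gold.filter (fun g => !(PySem.Str.strip g == ""))).map PySem.Str.strip
  let pred_norm := (pred.filter (fun p => !(PySem.Str.strip p == ""))).map PySem.Str.strip
  -- gold_pool/tp loop: state (tp, gold_pool); 'remove' = erase of the first occurrence
  let r := pred_norm.foldl
    (fun (acc : Int × List String) p =>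
      if p ∈ acc.2 then (acc.1 + 1, acc.2.erase p) else acc) (0, gold_norm)
  let tp := r.1
  let fp := (pred_norm.length : Int) - tp
  let fn := (gold_norm.length : Int) - tp
  let exact_match : Int :=
    if PySem.List.sorted gold_norm (fun x => x) false = PySem.List.sorted pred_norm (fun x => x) false
    then 1 else 0
  [("tp", tp), ("fp", fp), ("fn", fn), ("exact_match", exact_match)]

-- ===== PORT B =====
def pimCounter (xs : List String) : PySem.Dict String Int :=
  xs.foldl (fun c x => c.insert x (c.getD x 0 + 1)) PySem.Dict.empty

def per_instance_metrics_alt (gold : List String) (pred : List String) : List (String × Int) :=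
  let gold_norm := (gold.map PySem.Str.strip).filter (fun s => !(s == ""))
  let pred_norm := (pred.map PySem.Str.strip).filter (fun s => !(s == ""))
  let gc := pimCounter gold_norm
  let pc := pimCounter pred_norm
  let tp := pc.items.foldl (fun t kn => t + min kn.2 (gc.getD kn.1 0)) 0
  let exact_match : Int :=
    if gold_norm.length = pred_norm.length ∧ (pred_norm.length : Int) = tp then 1 else 0
  [("tp", tp), ("fp", (pred_norm.length : Int) - tp),
   ("fn", (gold_norm.length : Int) - tp), ("exact_match", exact_match)]

-- ===== PRECONDITION & SPEC =====
def Spec_per_instance_metrics (gold : List String) (pred : List String) (out : List (String × Int)) : Prop := out = per_instance_metrics_alt gold pred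
instance (gold : List String) (pred : List String) (out : List (String × Int)) : Decidable (Spec_per_instance_metrics gold pred out) := by unfold Spec_per_instance_metrics; infer_instance

-- ===== CLAIM (what is proved, stated in full; the proofs are below) =====
def Claim_equal_per_instance_metrics : Prop := ∀ (gold : List String) (pred : List String), Dom_per_instance_metrics gold pred → Spec_per_instance_metrics gold pred (per_instance_metrics gold pred)

-- ===== LEMMAS AND PROOFS =====

-- A's greedy matching loop computes the multiset-intersection cardinality.
lemma greedy_tp (ps : List String) : ∀ (t : Int) (g : List String),
    (ps.foldl (fun (acc : Int × List String) p =>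
        if p ∈ acc.2 then (acc.1 + 1, acc.2.erase p) else acc) (t, g)).1
      = t + (((ps : Multiset String) ∩ (g : Multiset String)).card : Int) := by
  induction ps with
  | nil => intro t g; simp
  | cons p ps ih =>
    intro t g
    by_cases hp : p ∈ g
    · have hmem : p ∈ (g : Multiset String) := by simpa using hp
      have hco : ((p :: ps : List String) : Multiset String) ∩ (g : Multiset String)
          = p ::ₘ ((ps : Multiset String) ∩ ((g : Multiset String).erase p)) := by
        rw [← Multiset.cons_coe, Multiset.cons_inter_of_pos _ hmem]
      simp only [List.foldl_cons, if_pos hp, ih, hco, Multiset.card_cons,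
        ← Multiset.coe_erase]
      push_cast; ring
    · have hmem : p ∉ (g : Multiset String) := by simpa using hp
      have hco : ((p :: ps : List String) : Multiset String) ∩ (g : Multiset String)
          = (ps : Multiset String) ∩ (g : Multiset String) := by
        rw [← Multiset.cons_coe, Multiset.cons_inter_of_neg _ hmem]
      simp only [List.foldl_cons, if_neg hp, ih, hco]

-- The intersection cardinality as the sum of per-key minima over the distinct pred keys.
lemma inter_card_eq_sum (ps gs : List String) :
    ((((ps : Multiset String) ∩ (gs : Multiset String)).card : Int))
      = ((PySem.Set.ofList ps).map
          (fun k => min ((ps.count k : Int)) ((gs.count k : Int)))).sum := by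
  have hnat : ((ps : Multiset String) ∩ (gs : Multiset String)).card
      = ((PySem.Set.ofList ps).map (fun k => min (ps.count k) (gs.count k))).sum := by
    have hsub : ((ps : Multiset String) ∩ (gs : Multiset String)).toFinset ⊆ ps.toFinset := by
      intro a ha
      simp only [Multiset.mem_toFinset, Multiset.mem_inter, Multiset.mem_coe] at ha
      simpa [List.mem_toFinset] using ha.1
    have h1 : ((ps : Multiset String) ∩ (gs : Multiset String)).card
        = ∑ a ∈ ps.toFinset, min (ps.count a) (gs.count a) := by
      rw [← Multiset.toFinset_sum_count_eq ((ps : Multiset String) ∩ (gs : Multiset String))]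
      rw [Finset.sum_subset hsub]
      · apply Finset.sum_congr rfl
        intro a _
        simp
      · intro a _ ha
        simp only [Multiset.mem_toFinset] at ha
        rw [Multiset.count_eq_zero]
        exact ha
    have hperm : (PySem.Set.ofList ps).Perm ps.dedup := by
      apply (List.perm_ext_iff_of_nodup (PySem.Set.nodup_ofList ps) ps.nodup_dedup).2
      intro a; simp [PySem.Set.mem_ofList, List.mem_dedup]
    have h2 : ∑ a ∈ ps.toFinset, min (ps.count a) (gs.count a)
        = ((PySem.Set.ofList ps).map (fun k => min (ps.count k) (gs.count k))).sum := by
      rw [← List.sum_toFinset _ (PySem.Set.nodup_ofList ps)]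
      apply Finset.sum_congr _ (fun _ _ => rfl)
      apply Finset.ext; intro a
      simp [List.mem_toFinset, PySem.Set.mem_ofList]
    rw [h1, h2]
  have hint : ((((ps : Multiset String) ∩ (gs : Multiset String)).card : Int))
      = (((PySem.Set.ofList ps).map (fun k => min (ps.count k) (gs.count k))).sum : Int) := by
    exact_mod_cast hnat
  rw [hint, Nat.cast_list_sum, List.map_map]
  refine congrArg List.sum (List.map_congr_left fun a _ => ?_)
  simp
lemma em_iff (gs ps : List String) :
    (PySem.List.sorted gs (fun x => x) false = PySem.List.sorted ps (fun x => x) false)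
      ↔ (gs.length = ps.length ∧
         (ps.length : Int) = (((ps : Multiset String) ∩ (gs : Multiset String)).card : Int)) := by
  rw [PySem.List.sorted_id_eq_sorted_id_iff_perm]
  constructor
  · intro h
    have hco : (gs : Multiset String) = (ps : Multiset String) := by
      exact_mod_cast Multiset.coe_eq_coe.2 h
    constructor
    · exact h.length_eq
    · rw [hco]
      have hss : (ps : Multiset String) ∩ (ps : Multiset String) = (ps : Multiset String) :=
        Multiset.ext.2 (fun a => by simp)
      rw [hss]; simp
  · rintro ⟨hlen, hcard⟩
    have hcard' : ((ps : Multiset String)).card ≤ ((ps : Multiset String) ∩ (gs : Multiset String)).card := by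
      have : (ps.length : Int) = (((ps : Multiset String) ∩ (gs : Multiset String)).card : Int) := hcard
      simp only [Multiset.coe_card]
      omega
    have h1 : (ps : Multiset String) = (ps : Multiset String) ∩ (gs : Multiset String) :=
      (Multiset.eq_of_le_of_card_le Multiset.inter_le_left hcard').symm
    have h2 : (ps : Multiset String) ≤ (gs : Multiset String) := by
      rw [h1]; exact Multiset.inter_le_right
    have hcards : ((gs : Multiset String)).card ≤ ((ps : Multiset String)).card := by
      simp [Multiset.coe_card, hlen]
    have : (ps : Multiset String) = (gs : Multiset String) :=
      Multiset.eq_of_le_of_card_le h2 hcards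
    exact Multiset.coe_eq_coe.1 this.symm

-- B's counter-pass tp equals A's greedy tp.
lemma tp_eq (psn gs : List String) :
    (pimCounter psn).items.foldl (fun t kn => t + min kn.2 ((pimCounter gs).getD kn.1 0)) 0
      = (psn.foldl (fun (acc : Int × List String) p =>
          if p ∈ acc.2 then (acc.1 + 1, acc.2.erase p) else acc) (0, gs)).1 := by
  have hc : pimCounter psn = PySem.Dict.counter psn := rfl
  have hcg : pimCounter gs = PySem.Dict.counter gs := rfl
  rw [greedy_tp, hc, hcg, PySem.Dict.items_counter,
    PySem.List.foldl_add (g := fun kn : String × Int => min kn.2 ((PySem.Dict.counter gs).getD kn.1 0)),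
    List.map_map]
  rw [inter_card_eq_sum]
  simp [Function.comp_def, PySem.Dict.getD_counter]

lemma core (gs psn : List String) :
    ([(("tp" : String),
        (psn.foldl (fun (acc : Int × List String) p =>
          if p ∈ acc.2 then (acc.1 + 1, acc.2.erase p) else acc) (0, gs)).1),
      ("fp", (psn.length : Int) - (psn.foldl (fun (acc : Int × List String) p =>
          if p ∈ acc.2 then (acc.1 + 1, acc.2.erase p) else acc) (0, gs)).1),
      ("fn", (gs.length : Int) - (psn.foldl (fun (acc : Int × List String) p =>
          if p ∈ acc.2 then (acc.1 + 1, acc.2.erase p) else acc) (0, gs)).1),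
      ("exact_match",
        if PySem.List.sorted gs (fun x => x) false = PySem.List.sorted psn (fun x => x) false
        then (1 : Int) else 0)] : List (String × Int))
    = [("tp", (pimCounter psn).items.foldl (fun t kn => t + min kn.2 ((pimCounter gs).getD kn.1 0)) 0),
       ("fp", (psn.length : Int) - (pimCounter psn).items.foldl (fun t kn => t + min kn.2 ((pimCounter gs).getD kn.1 0)) 0),
       ("fn", (gs.length : Int) - (pimCounter psn).items.foldl (fun t kn => t + min kn.2 ((pimCounter gs).getD kn.1 0)) 0),
       ("exact_match",
        if gs.length = psn.length ∧ (psn.length : Int) =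
            (pimCounter psn).items.foldl (fun t kn => t + min kn.2 ((pimCounter gs).getD kn.1 0)) 0
        then (1 : Int) else 0)] := by
  rw [tp_eq psn gs]
  have hA : (psn.foldl (fun (acc : Int × List String) p =>
      if p ∈ acc.2 then (acc.1 + 1, acc.2.erase p) else acc) (0, gs)).1
      = (((psn : Multiset String) ∩ (gs : Multiset String)).card : Int) := by
    rw [greedy_tp]; ring
  have hem := em_iff gs psn
  rw [← hA] at hem
  simp only [List.cons.injEq, Prod.mk.injEq, and_true, true_and]
  exact if_congr hem rfl rfl

-- ===== VERDICT (by name: the statement is the Claim_ definition above) =====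
theorem per_instance_metrics_spec : Claim_equal_per_instance_metrics := by
  intro gold pred _
  show per_instance_metrics gold pred = per_instance_metrics_alt gold pred
  unfold per_instance_metrics per_instance_metrics_alt
  simp only [List.filter_map]
  exact core _ _
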